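-- pv_equiv track=rewrite | github.com/ralex2304/PrusaSlicer-fan-rampUp | script.py | removeGXYZE
-- ===== SOURCE A (Python) =====
-- def removeGXYZE(line: str) -> str:
--     i = 0
--     while i < len(line):
--         if line[i] in "GXYZE":
--             x = i
--             for j in range(i + 1, len(line)):
--                 if line[j] == " " or line[j] == ";":
--                     x = j
--                     break
--             else:
--                 x = len(line)
--             line = line[:i] + line[x:]
--             i -= 1
--         i += 1
--     while "  " in line:
--         line = line.replace("  ", " ")
--     if len(line) > 0 and line[0] != " ":
--         line = " " + line
--     return line
-- ===== SOURCE B (Python) =====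
-- def removeGXYZE(line: str) -> str:
--     # One left-to-right pass drops each GXYZE-started token (up to the next
--     # ' ' or ';', which is kept); a second pass collapses space runs.
--     out = []
--     skipping = False
--     for c in line:
--         if skipping:
--             if c == ' ' or c == ';':
--                 skipping = False
--                 out.append(c)
--         elif c in "GXYZE":
--             skipping = True
--         else:
--             out.append(c)
--     res = []
--     for c in out:
--         if not (c == ' ' and res and res[-1] == ' '):
--             res.append(c)
--     if res and res[0] != ' ':
--         res.insert(0, ' ')
--     return ''.join(res)
-- ===== Notes on version B (the rewrite author's own statement) =====
-- stated objective: alternative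
-- what changed: Replaces A's index-surgery while-loop with repeated string slicing plus a repeated double-space-replace fixpoint loop by a single left-to-right token-skipping pass followed by one online space-collapsing pass.
import Mathlib
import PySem

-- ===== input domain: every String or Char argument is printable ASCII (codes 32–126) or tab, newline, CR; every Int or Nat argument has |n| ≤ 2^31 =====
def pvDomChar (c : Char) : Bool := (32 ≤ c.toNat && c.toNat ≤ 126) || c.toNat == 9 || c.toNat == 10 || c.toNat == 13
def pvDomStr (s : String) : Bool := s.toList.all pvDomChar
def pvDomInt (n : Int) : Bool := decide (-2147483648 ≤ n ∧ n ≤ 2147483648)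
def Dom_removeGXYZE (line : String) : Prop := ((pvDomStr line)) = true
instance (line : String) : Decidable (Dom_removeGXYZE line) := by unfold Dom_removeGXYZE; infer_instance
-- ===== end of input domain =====

-- B replaces A's slice-and-rescan index loop and its double-space-replace fixpoint loop by two single left-to-right passes (alternative decomposition, same observable result).

-- ===== PORT A =====

-- A's inner for-j loop: first index at or after j holding a delimiter, else len(line)
-- (rem is the suffix line[j:], j the current absolute index; returns the break index, or len(line))
def pvFindDelim (rem : List Char) (j : Nat) : Nat :=
  match rem with
  | [] => j
  | c :: r => if c = ' ' ∨ c = ';' then j else pvFindDelim r (j + 1)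

-- the outer 'while i < len(line)' loop of A: i is the index, the list is A's mutated line;
-- fuel only makes the recursion total, it is never exhausted on the actual calls (proved below)
def pvLoopA (fuel : Nat) (l : List Char) (i : Nat) : List Char :=
  match fuel with
  | 0 => l
  | fuel + 1 =>
    if h : i < l.length then
      if l[i] = 'G' ∨ l[i] = 'X' ∨ l[i] = 'Y' ∨ l[i] = 'Z' ∨ l[i] = 'E' then
        pvLoopA fuel (l.take i ++ l.drop (pvFindDelim (l.drop (i + 1)) (i + 1))) i
      else
        pvLoopA fuel l (i + 1)
    else l

-- the double-space membership test of A's second while-loop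
def pvHasDD (l : List Char) : Bool :=
  match l with
  | [] => false
  | [_] => false
  | c1 :: c2 :: r => if c1 = ' ' ∧ c2 = ' ' then true else pvHasDD (c2 :: r)

-- line.replace of a double space by a single one: left-to-right, non-overlapping
def pvRep (l : List Char) : List Char :=
  match l with
  | [] => []
  | [c] => [c]
  | c1 :: c2 :: r => if c1 = ' ' ∧ c2 = ' ' then ' ' :: pvRep r else c1 :: pvRep (c2 :: r)

-- the second while-loop of A (replace until no double space remains); fuel only makes it total (never exhausted, proved below)
def pvWhileRep (fuel : Nat) (l : List Char) : List Char :=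
  match fuel with
  | 0 => l
  | fuel + 1 => if pvHasDD l = true then pvWhileRep fuel (pvRep l) else l

def removeGXYZE (line : String) : String :=
  -- A's final guard: prepend a space to a nonempty result not starting with one
  match pvWhileRep ((pvLoopA (2 * line.toList.length) line.toList 0).length + 1)
        (pvLoopA (2 * line.toList.length) line.toList 0) with
  | [] => String.ofList []
  | c :: r => if c ≠ ' ' then String.ofList (' ' :: c :: r) else String.ofList (c :: r)

-- ===== PORT B =====

-- B's first for-loop; 'skipping' is the loop flag, appends become cons on the recursive result
def pvStripTok (skipping : Bool) (l : List Char) : List Char :=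
  match skipping, l with
  | _, [] => []
  | true, c :: r => if c = ' ' ∨ c = ';' then c :: pvStripTok false r else pvStripTok true r
  | false, c :: r =>
      if c = 'G' ∨ c = 'X' ∨ c = 'Y' ∨ c = 'Z' ∨ c = 'E' then pvStripTok true r
      else c :: pvStripTok false r

-- B's second for-loop; prevSpace tracks whether the last emitted character was a space
def pvDedupe (prevSpace : Bool) (l : List Char) : List Char :=
  match l with
  | [] => []
  | c :: r => if c = ' ' ∧ prevSpace then pvDedupe true r else c :: pvDedupe (c = ' ') r

def removeGXYZE_alt (line : String) : String :=
  -- B's final guard: prepend a space to a nonempty result not starting with one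
  match pvDedupe false (pvStripTok false line.toList) with
  | [] => String.ofList []
  | c :: r => if c ≠ ' ' then String.ofList (' ' :: c :: r) else String.ofList (c :: r)

-- ===== PRECONDITION & SPEC =====
def Spec_removeGXYZE (line : String) (out : String) : Prop := out = removeGXYZE_alt line
instance (line : String) (out : String) : Decidable (Spec_removeGXYZE line out) := by unfold Spec_removeGXYZE; infer_instance

-- ===== CLAIM (what is proved, stated in full; the proofs are below) =====
def Claim_equal_removeGXYZE : Prop := ∀ (line : String), Dom_removeGXYZE line → Spec_removeGXYZE line (removeGXYZE line)

-- ===== LEMMAS AND PROOFS =====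

theorem pvFindDelim_ge (rem : List Char) (j : Nat) : j ≤ pvFindDelim rem j := by
  induction rem generalizing j with
  | nil => exact Nat.le_refl j
  | cons c r ih =>
      unfold pvFindDelim
      split
      · exact Nat.le_refl j
      · exact Nat.le_trans (Nat.le_succ j) (ih (j + 1))

theorem pvFindDelim_le (rem : List Char) (j : Nat) : pvFindDelim rem j ≤ j + rem.length := by
  induction rem generalizing j with
  | nil => simp [pvFindDelim]
  | cons c r ih =>
      unfold pvFindDelim
      split
      · simp
      · have := ih (j + 1); simp at this ⊢; omega

-- skipping from index j up to the first delimiter lands exactly at pvFindDelim (l.drop j) j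
theorem pvSkip_eq (rem : List Char) (j : Nat) (l : List Char) (hrem : l.drop j = rem) :
    pvStripTok true rem = pvStripTok false (l.drop (pvFindDelim rem j)) := by
  induction rem generalizing j with
  | nil => simp [pvFindDelim, hrem, pvStripTok]
  | cons c r ih =>
      unfold pvFindDelim
      split
      · rename_i hd
        rw [hrem]
        rcases hd with hd | hd <;> subst hd <;> simp [pvStripTok]
      · rename_i hd
        simp only [pvStripTok, if_neg hd]
        exact ih (j + 1) (by rw [← List.drop_drop, hrem]; rfl)

theorem pvLoopA_eq (fuel : Nat) (l : List Char) (i : Nat) (hf : 2 * l.length ≤ fuel + i) :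
    pvLoopA fuel l i = l.take i ++ pvStripTok false (l.drop i) := by
  induction fuel generalizing l i with
  | zero =>
      have hge : l.length ≤ i := by omega
      rw [List.take_of_length_le hge, List.drop_eq_nil_of_le hge]
      simp [pvLoopA, pvStripTok]
  | succ fuel ih =>
      unfold pvLoopA
      split
      · rename_i h
        split
        · rename_i hm
          set x := pvFindDelim (l.drop (i + 1)) (i + 1) with hx
          have hxge : i + 1 ≤ x := pvFindDelim_ge _ _
          have hxle : x ≤ l.length := by
            have := pvFindDelim_le (l.drop (i + 1)) (i + 1)
            simp at this; omega
          have hlen : (l.take i).length = i := by simp; omega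
          rw [ih _ _ (by simp; omega),
              List.take_append_of_le_length (by omega), List.take_take, Nat.min_self,
              List.drop_append_of_le_length (by omega)]
          rw [List.drop_eq_getElem_cons h]
          simp only [pvStripTok]
          rw [if_pos hm, pvSkip_eq (l.drop (i + 1)) (i + 1) l rfl, ← hx]
          congr 2
          simp
        · rename_i hm
          rw [ih _ _ (by omega), List.drop_eq_getElem_cons h]
          simp only [pvStripTok]
          rw [if_neg hm]
          have htc := List.take_concat_get' l i h
          rw [← htc, List.append_assoc]
          rfl
      · rename_i h
        rw [List.take_of_length_le (by omega), List.drop_eq_nil_of_le (by omega)]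
        simp [pvStripTok]

theorem pvRep_le (l : List Char) : (pvRep l).length ≤ l.length := by
  fun_induction pvRep l with
  | case1 => simp
  | case2 c => simp
  | case3 c1 c2 r hc ih => simp; omega
  | case4 c1 c2 r hc ih => simp at ih ⊢; omega

theorem pvRep_len (l : List Char) : pvHasDD l = true → (pvRep l).length < l.length := by
  fun_induction pvRep l with
  | case1 => intro hd; simp [pvHasDD] at hd
  | case2 c => intro hd; simp [pvHasDD] at hd
  | case3 c1 c2 r hc ih =>
      intro _
      have := pvRep_le r
      simp; omega
  | case4 c1 c2 r hc ih =>
      intro hd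
      unfold pvHasDD at hd
      rw [if_neg hc] at hd
      have := ih hd
      simp at this ⊢; omega

-- one replace pass does not change the de-duplicated string
theorem pvDedupe_rep (l : List Char) (prev : Bool) :
    pvDedupe prev (pvRep l) = pvDedupe prev l := by
  fun_induction pvRep l generalizing prev with
  | case1 => rfl
  | case2 c => rfl
  | case3 c1 c2 r hc ih =>
      obtain ⟨h1, h2⟩ := hc
      subst h1; subst h2
      cases prev <;> simp [pvDedupe, ih]
  | case4 c1 c2 r hc ih =>
      simp only [pvDedupe]
      by_cases hp : c1 = ' ' ∧ prev
      · rw [if_pos hp, if_pos hp, ih]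
        conv_lhs => rw [pvDedupe]
        simp
      · rw [if_neg hp, if_neg hp, ih]
        conv_lhs => rw [pvDedupe]

-- a string with no double space is a fixpoint of de-duplication
theorem pvDedupe_id (l : List Char) (prev : Bool) (hdd : pvHasDD l = false)
    (hp : prev = true → l.head? ≠ some ' ') : pvDedupe prev l = l := by
  induction l generalizing prev with
  | nil => rfl
  | cons c r ih =>
      have hcp : ¬ (c = ' ' ∧ prev) := by
        rintro ⟨hc, hprev⟩
        exact hp hprev (by simp [hc])
      simp only [pvDedupe, if_neg hcp]
      cases r with
      | nil => rfl
      | cons c2 r' =>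
          unfold pvHasDD at hdd
          by_cases hc2 : c = ' ' ∧ c2 = ' '
          · rw [if_pos hc2] at hdd; exact absurd hdd (by simp)
          · rw [if_neg hc2] at hdd
            rw [ih _ hdd]
            intro hcs
            simp only [decide_eq_true_eq] at hcs
            simp only [List.head?_cons, ne_eq, Option.some_inj]
            intro hc2'
            exact hc2 ⟨hcs, hc2'⟩

theorem pvWhileRep_eq (fuel : Nat) (l : List Char) (hf : l.length < fuel) :
    pvWhileRep fuel l = pvDedupe false l := by
  induction fuel generalizing l with
  | zero => omega
  | succ fuel ih =>
      unfold pvWhileRep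
      split
      · rename_i h
        rw [ih _ (by have := pvRep_len l h; omega), pvDedupe_rep]
      · rename_i h
        rw [pvDedupe_id l false (by simpa using h) (by simp)]

-- ===== VERDICT (by name: the statement is the Claim_ definition above) =====
theorem removeGXYZE_spec : Claim_equal_removeGXYZE := by
  intro line _
  unfold Spec_removeGXYZE removeGXYZE removeGXYZE_alt
  rw [pvLoopA_eq _ _ 0 (by omega)]
  rw [pvWhileRep_eq]
  · simp
  · exact Nat.lt_succ_self _
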